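-- pv_equiv track=rewrite | github.com/stevenscain/Gemma-OCR-Test | run_tests.py | parse_page_boundaries
-- ===== SOURCE A (Python) =====
-- def parse_page_boundaries(stdout):
--     """Parse page boundary markers from OCR output."""
--     pages = {}
--     current_page = None
--     current_text = []
--
--     for line in stdout.split("\n"):
--         stripped = line.strip()
--         if stripped.startswith("=== PAGE ") and stripped.endswith("==="):
--             if current_page is not None:
--                 pages[current_page] = "\n".join(current_text).strip()
--             current_page = stripped.replace("=== PAGE ", "").replace(" ===", "")
--             current_text = []
--         else:
--             current_text.append(line)
--
--     # Handle last page or single-page (no markers)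
--     if current_page is not None:
--         pages[current_page] = "\n".join(current_text).strip()
--     elif stdout.strip():
--         pages["1"] = stdout.strip()
--
--     return pages
-- ===== SOURCE B (Python) =====
-- def _is_marker(line):
--     s = line.strip()
--     return s.startswith("=== PAGE ") and s.endswith("===")
--
--
-- def _name(line):
--     return line.strip().replace("=== PAGE ", "").replace(" ===", "")
--
--
-- def parse_page_boundaries(stdout):
--     """Parse page boundary markers from OCR output (segment-splitting version)."""
--     lines = stdout.split("\n")
--     # drop everything before the first marker line
--     while lines and not _is_marker(lines[0]):
--         lines = lines[1:]
--     if not lines: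
--         t = stdout.strip()
--         return {"1": t} if t else {}
--     pages = {}
--     while lines:
--         marker, rest = lines[0], lines[1:]
--         body = []
--         while rest and not _is_marker(rest[0]):
--             body.append(rest[0])
--             rest = rest[1:]
--         pages[_name(marker)] = "\n".join(body).strip()
--         lines = rest
--     return pages
-- ===== Notes on version B (the rewrite author's own statement) =====
-- stated objective: alternative
-- what changed: Replaces A's single-pass state machine (pages/current_page/current_text accumulators flushed at each marker) with a skip-prefix-then-split decomposition: drop lines before the first marker, then repeatedly cut off one marker plus its body segment (take/drop until the next marker) and assign it.
import Mathlib
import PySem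

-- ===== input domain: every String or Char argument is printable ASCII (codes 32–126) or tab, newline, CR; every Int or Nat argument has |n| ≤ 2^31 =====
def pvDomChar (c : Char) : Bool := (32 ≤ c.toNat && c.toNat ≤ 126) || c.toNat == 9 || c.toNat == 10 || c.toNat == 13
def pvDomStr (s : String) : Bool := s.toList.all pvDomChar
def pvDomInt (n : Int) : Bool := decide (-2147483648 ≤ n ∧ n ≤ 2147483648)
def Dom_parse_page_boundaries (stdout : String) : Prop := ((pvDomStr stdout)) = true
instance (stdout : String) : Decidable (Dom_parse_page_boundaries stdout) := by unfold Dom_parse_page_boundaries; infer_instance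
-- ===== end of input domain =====

-- B replaces A's flush-at-marker accumulator state machine by a skip-prefix-then-split-into-segments
-- decomposition (same cost); equivalence of the two is proved for every input.


-- ===== PORT A =====
-- loop body of A's 'for line in stdout.split("\n")'
def pvStepA (st : PySem.Dict String String × Option String × List String) (line : String) :
    PySem.Dict String String × Option String × List String :=
  let stripped := PySem.Str.strip line
  if PySem.Str.startswith stripped "=== PAGE " && PySem.Str.endswith stripped "===" then
    let pages :=
      match st.2.1 with
      | some p => st.1.insert p (PySem.Str.strip (PySem.Str.join "\n" st.2.2))
      | none => st.1
    (pages, some (PySem.Str.replace (PySem.Str.replace stripped "=== PAGE " "") " ===" ""), ([] : List String))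
  else
    (st.1, st.2.1, st.2.2 ++ [line])

def parse_page_boundaries (stdout : String) : List (String × String) :=
  let st := ((PySem.Str.split? stdout "\n").getD []).foldl pvStepA
      ((PySem.Dict.empty : PySem.Dict String String), none, ([] : List String))
  match st with
  | (pages, some p, txt) => (pages.insert p (PySem.Str.strip (PySem.Str.join "\n" txt))).items
  | (pages, none, _) =>
      if PySem.Str.strip stdout = "" then pages.items
      else (pages.insert "1" (PySem.Str.strip stdout)).items

-- ===== PORT B =====
def pvIsMarker (line : String) : Bool :=
  let s := PySem.Str.strip line
  PySem.Str.startswith s "=== PAGE " && PySem.Str.endswith s "==="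

def pvName (line : String) : String :=
  PySem.Str.replace (PySem.Str.replace (PySem.Str.strip line) "=== PAGE " "") " ===" ""

-- B's outer while loop: lines starts with a marker; cut off its body segment, assign, continue
def pvSegments (ls : List String) (pages : PySem.Dict String String) : PySem.Dict String String :=
  match ls with
  | [] => pages
  | m :: rest =>
      let body := rest.takeWhile (fun l => !pvIsMarker l)
      let rest' := rest.dropWhile (fun l => !pvIsMarker l)
      pvSegments rest' (pages.insert (pvName m) (PySem.Str.strip (PySem.Str.join "\n" body)))
termination_by ls.length
decreasing_by
  have h := (List.dropWhile_sublist (l := rest) (p := fun l => !pvIsMarker l)).length_le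
  simp only [List.length_cons]
  omega

def parse_page_boundaries_alt (stdout : String) : List (String × String) :=
  let lines := ((PySem.Str.split? stdout "\n").getD []).dropWhile (fun l => !pvIsMarker l)
  match lines with
  | [] =>
      if PySem.Str.strip stdout = "" then []
      else [("1", PySem.Str.strip stdout)]
  | _ => (pvSegments lines PySem.Dict.empty).items

-- ===== PRECONDITION & SPEC =====
def Spec_parse_page_boundaries (stdout : String) (out : List (String × String)) : Prop := out = parse_page_boundaries_alt stdout
instance (stdout : String) (out : List (String × String)) : Decidable (Spec_parse_page_boundaries stdout out) := by unfold Spec_parse_page_boundaries; infer_instance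

-- ===== CLAIM (what is proved, stated in full; the proofs are below) =====
def Claim_equal_parse_page_boundaries : Prop := ∀ (stdout : String), Dom_parse_page_boundaries stdout → Spec_parse_page_boundaries stdout (parse_page_boundaries stdout)

-- ===== LEMMAS AND PROOFS =====

-- A's loop from a state with current_page = some p ends, after finalization, in B's segment recursion
theorem pv_fold_some (ls : List String) :
    ∀ (pages : PySem.Dict String String) (p : String) (txt : List String),
      (match ls.foldl pvStepA (pages, some p, txt) with
       | (pg, some q, tx) => pg.insert q (PySem.Str.strip (PySem.Str.join "\n" tx))
       | (pg, none, _) => pg)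
      = pvSegments (ls.dropWhile (fun l => !pvIsMarker l))
          (pages.insert p (PySem.Str.strip (PySem.Str.join "\n"
            (txt ++ ls.takeWhile (fun l => !pvIsMarker l))))) := by
  induction ls with
  | nil =>
      intro pages p txt
      simp [pvSegments]
  | cons l ls ih =>
      intro pages p txt
      by_cases hm : pvIsMarker l = true
      · have hstep : pvStepA (pages, some p, txt) l
            = (pages.insert p (PySem.Str.strip (PySem.Str.join "\n" txt)), some (pvName l), ([] : List String)) := by
          simp only [pvStepA, pvName]
          rw [if_pos (by simpa [pvIsMarker] using hm)]
        simp only [List.foldl_cons, hstep]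
        rw [ih]
        rw [List.dropWhile_cons_of_neg (by simp [hm]), List.takeWhile_cons_of_neg (by simp [hm])]
        conv_rhs => rw [pvSegments]
        simp
      · have hstep : pvStepA (pages, some p, txt) l = (pages, some p, txt ++ [l]) := by
          simp only [pvStepA]
          rw [if_neg (by simpa [pvIsMarker] using hm)]
        simp only [List.foldl_cons, hstep]
        rw [ih]
        rw [List.dropWhile_cons_of_pos (by simp [hm]), List.takeWhile_cons_of_pos (by simp [hm])]
        simp

-- A's loop from the initial (no current page) state: lines before the first marker are skipped
theorem pv_fold_none (ls : List String) :
    ∀ (pages : PySem.Dict String String) (txt : List String),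
      ls.foldl pvStepA (pages, none, txt)
      = (match ls.dropWhile (fun l => !pvIsMarker l) with
         | [] => (pages, none, txt ++ ls)
         | m :: rest => rest.foldl pvStepA (pages, some (pvName m), ([] : List String))) := by
  induction ls with
  | nil => intro pages txt; simp
  | cons l ls ih =>
      intro pages txt
      by_cases hm : pvIsMarker l = true
      · have hstep : pvStepA (pages, none, txt) l = (pages, some (pvName l), ([] : List String)) := by
          simp only [pvStepA, pvName]
          rw [if_pos (by simpa [pvIsMarker] using hm)]
        simp only [List.foldl_cons, hstep]
        rw [List.dropWhile_cons_of_neg (by simp [hm])]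
      · have hstep : pvStepA (pages, none, txt) l = (pages, none, txt ++ [l]) := by
          simp only [pvStepA]
          rw [if_neg (by simpa [pvIsMarker] using hm)]
        simp only [List.foldl_cons, hstep]
        rw [ih]
        rw [List.dropWhile_cons_of_pos (by simp [hm])]
        rcases h : ls.dropWhile (fun l => !pvIsMarker l) with _ | ⟨m, rest⟩ <;> simp

-- once a page is open, A's loop always keeps some current page
theorem pv_fold_isSome (ls : List String) :
    ∀ (pages : PySem.Dict String String) (p : String) (txt : List String),
      ((ls.foldl pvStepA (pages, some p, txt)).2.1).isSome := by
  induction ls with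
  | nil => intro pages p txt; simp
  | cons l ls ih =>
      intro pages p txt
      simp only [List.foldl_cons, pvStepA]
      by_cases hm : (PySem.Str.startswith (PySem.Str.strip l) "=== PAGE "
          && PySem.Str.endswith (PySem.Str.strip l) "===") = true
      · rw [if_pos hm]; exact ih _ _ _
      · rw [if_neg hm]; exact ih _ _ _

-- ===== VERDICT (by name: the statement is the Claim_ definition above) =====
theorem parse_page_boundaries_spec : Claim_equal_parse_page_boundaries := by
  intro stdout _
  unfold Spec_parse_page_boundaries parse_page_boundaries parse_page_boundaries_alt
  rw [pv_fold_none]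
  rcases h : ((PySem.Str.split? stdout "\n").getD []).dropWhile (fun l => !pvIsMarker l) with _ | ⟨m, rest⟩
  · simp only []
    split_ifs <;> rfl
  · simp only []
    have := pv_fold_some rest (PySem.Dict.empty) (pvName m) []
    rcases hst : rest.foldl pvStepA (PySem.Dict.empty, some (pvName m), ([] : List String)) with ⟨pg, cur, tx⟩
    rw [hst] at this
    conv_rhs => rw [pvSegments]
    rcases cur with _ | q
    · have hs := pv_fold_isSome rest PySem.Dict.empty (pvName m) []
      rw [hst] at hs
      simp at hs
    · simp only [] at this
      simp [this]
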